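-- pv_equiv track=rewrite | github.com/KIT-IBPT/vinegar | vinegar/data_source/yaml_target.py | _resolve_relative_include
-- ===== SOURCE A (Python) =====
-- def _resolve_relative_include(
--     include_file_name: str,
--     parent_file_name: str,
--     parent_file_name_for_error_message: str,
-- ):
--     # If the include file name was empty, using split() would result in the
--     # list [""], which would lead to a misleading error message later, so
--     # we rather catch this case here.
--     if not include_file_name:
--         raise RuntimeError(
--             "Invalid reference in include section of file "
--             f"{parent_file_name_for_error_message}: The name of an "
--             "include file must not be empty."
--         )
--     # If the file name does not start with a dot, the name is absolute and
--     # we do not have to do anything.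
--     if not include_file_name.startswith("."):
--         return include_file_name
--     # For each leading dot in the include name, we remove one component
--     # from the parent name.
--     include_file_name_split = include_file_name.split(".")
--     parent_file_name_split = parent_file_name.split(".")
--     while include_file_name_split and not include_file_name_split[0]:
--         include_file_name_split = include_file_name_split[1:]
--         if not parent_file_name_split:
--             raise RuntimeError(
--                 "Invalid reference in include section of file "
--                 f"{parent_file_name_for_error_message}: The include file "
--                 f"name {include_file_name!r} references a file outside "
--                 "the root of the data-source file tree."
--             )
--         parent_file_name_split = parent_file_name_split[:-1]
--     # We do not allow an include file name that only consists of dots. The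
--     # reason is that there is no implict way of referencing the root of the
--     # directory tree (a file with the name “init.yaml” in the root of the
--     # file tree cannot be referenced by specifying an empty name). So, we
--     # could allow to reference “.” from a file “a/b.yaml”, but not from
--     # “c.yaml”, but such a reference only being allowed depending on where
--     # it is used would not be very intuitive, so we rather disallow it
--     # everywhere.
--     # This does not keep the user from reference an “init.yaml” file in the
--     # hierarchy above the current file, it just means that “.init” has to
--     # be included instead of “.” and “..init” instead of “..”, etc.
--     if not include_file_name_split:
--         raise RuntimeError(
--             "Invalid reference in include section of file "
--             f"{parent_file_name_for_error_message}: The include file name "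
--             f"{include_file_name!r} is invalid: The file name must not "
--             "only consist of dots."
--         )
--     # We combine the reduced parent file name with the include file name in
--     # order to get the absolute name of the include file.
--     return ".".join(parent_file_name_split + include_file_name_split)
-- ===== SOURCE B (Python) =====
-- def _resolve_relative_include(
--     include_file_name: str,
--     parent_file_name: str,
--     parent_file_name_for_error_message: str,
-- ):
--     if not include_file_name:
--         raise RuntimeError(
--             "Invalid reference in include section of file "
--             f"{parent_file_name_for_error_message}: The name of an "
--             "include file must not be empty."
--         )
--     if not include_file_name.startswith("."):
--         return include_file_name
--     parts = include_file_name.split(".")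
--     parent_parts = parent_file_name.split(".")
--     # Each leading empty component corresponds to one level that has to be
--     # climbed in the parent name.
--     up = next((i for i, part in enumerate(parts) if part), len(parts))
--     if up > len(parent_parts):
--         raise RuntimeError(
--             "Invalid reference in include section of file "
--             f"{parent_file_name_for_error_message}: The include file "
--             f"name {include_file_name!r} references a file outside "
--             "the root of the data-source file tree."
--         )
--     remaining = parts[up:]
--     if not remaining:
--         raise RuntimeError(
--             "Invalid reference in include section of file "
--             f"{parent_file_name_for_error_message}: The include file name "
--             f"{include_file_name!r} is invalid: The file name must not "
--             "only consist of dots."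
--         )
--     return ".".join(parent_parts[: len(parent_parts) - up] + remaining)
-- ===== Notes on version B (the rewrite author's own statement) =====
-- stated objective: simpler
-- what changed: B splits both names once, counts the leading empty components of the include split (next/enumerate), and resolves with a single slice and join, instead of A's while loop that pops one empty component and reslices the parent list per iteration.
import Mathlib
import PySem

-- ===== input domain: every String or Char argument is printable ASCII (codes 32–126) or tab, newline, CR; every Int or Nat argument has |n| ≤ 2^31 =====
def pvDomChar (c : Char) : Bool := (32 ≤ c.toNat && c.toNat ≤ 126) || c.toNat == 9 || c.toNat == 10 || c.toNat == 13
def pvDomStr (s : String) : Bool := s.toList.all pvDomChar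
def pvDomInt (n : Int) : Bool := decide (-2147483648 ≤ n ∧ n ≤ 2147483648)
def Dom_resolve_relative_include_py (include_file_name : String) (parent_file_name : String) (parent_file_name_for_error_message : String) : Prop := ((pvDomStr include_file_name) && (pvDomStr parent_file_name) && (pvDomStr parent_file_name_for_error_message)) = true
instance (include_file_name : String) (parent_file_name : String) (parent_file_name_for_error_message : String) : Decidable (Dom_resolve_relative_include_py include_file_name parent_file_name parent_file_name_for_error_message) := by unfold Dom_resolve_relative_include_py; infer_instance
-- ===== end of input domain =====

-- B splits both names once, counts the leading empty components of the include
-- split, and resolves the parent prefix with a single slice and join, instead of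
-- A's while loop that reslices both lists one step per leading dot; objective:
-- simpler. On inputs where A raises RuntimeError B raises the identical
-- RuntimeError (excluded by Pre_); both ports return "" there.

-- ===== PORT A =====
-- the while loop of A: strip leading empty components, trimming one parent
-- component each time; none = the "outside the root" RuntimeError
def pvLoopA : List String → List String → Option (List String × List String)
  | [], ps => some ([], ps)
  | s :: rest, ps =>
    if s = "" then
      if ps = [] then none else pvLoopA rest ps.dropLast
    else some (s :: rest, ps)

def resolve_relative_include_py (include_file_name : String) (parent_file_name : String) (parent_file_name_for_error_message : String) : String :=
  if include_file_name = "" then ""  -- RuntimeError: empty include name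
  else if !(PySem.Str.startswith include_file_name ".") then include_file_name
  else
    -- s.split(".") never raises (separator is nonempty), so getD [] is exact
    let include_file_name_split := (PySem.Str.split? include_file_name ".").getD []
    let parent_file_name_split := (PySem.Str.split? parent_file_name ".").getD []
    match pvLoopA include_file_name_split parent_file_name_split with
    | none => ""  -- RuntimeError: outside the root
    | some (is', ps') =>
      if is' = [] then ""  -- RuntimeError: only dots
      else PySem.Str.join "." (ps' ++ is')

-- ===== PORT B =====
def resolve_relative_include_py_alt (include_file_name : String) (parent_file_name : String) (parent_file_name_for_error_message : String) : String :=
  if include_file_name = "" then ""  -- RuntimeError: empty include name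
  else if !(PySem.Str.startswith include_file_name ".") then include_file_name
  else
    let parts := (PySem.Str.split? include_file_name ".").getD []
    let parent_parts := (PySem.Str.split? parent_file_name ".").getD []
    -- up = next((i for i, part in enumerate(parts) if part), len(parts))
    let up := parts.findIdx (fun part => !(part == ""))
    if parent_parts.length < up then ""  -- RuntimeError: outside the root
    else
      let remaining := parts.drop up
      if remaining = [] then ""  -- RuntimeError: only dots
      else PySem.Str.join "." (parent_parts.take (parent_parts.length - up) ++ remaining)

-- ===== PRECONDITION & SPEC =====
-- Pre_ excludes exactly the inputs on which A raises RuntimeError (B raises the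
-- identical RuntimeError there): an empty include name, a dotted name consisting
-- only of dots, and a dotted name with more leading dots than the parent name's
-- '.'-split has components.
def Pre_resolve_relative_include_py (include_file_name : String) (parent_file_name : String) (parent_file_name_for_error_message : String) : Prop :=
  include_file_name ≠ "" ∧
    (PySem.Str.startswith include_file_name "." = true →
      ((PySem.Str.split? include_file_name ".").getD []).findIdx (fun part => !(part == "")) ≤
          ((PySem.Str.split? parent_file_name ".").getD []).length ∧
        ((PySem.Str.split? include_file_name ".").getD []).drop
            (((PySem.Str.split? include_file_name ".").getD []).findIdx (fun part => !(part == ""))) ≠ [])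

instance (include_file_name : String) (parent_file_name : String) (parent_file_name_for_error_message : String) : Decidable (Pre_resolve_relative_include_py include_file_name parent_file_name parent_file_name_for_error_message) := by unfold Pre_resolve_relative_include_py; infer_instance

def pvWitness_resolve_relative_include_py : String × String × String := ("..c.d", "a.b.x", "a/b/x.yaml")

def Spec_resolve_relative_include_py (include_file_name : String) (parent_file_name : String) (parent_file_name_for_error_message : String) (out : String) : Prop := out = resolve_relative_include_py_alt include_file_name parent_file_name parent_file_name_for_error_message
instance (include_file_name : String) (parent_file_name : String) (parent_file_name_for_error_message : String) (out : String) : Decidable (Spec_resolve_relative_include_py include_file_name parent_file_name parent_file_name_for_error_message out) := by unfold Spec_resolve_relative_include_py; infer_instance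

-- ===== CLAIM (what is proved, stated in full; the proofs are below) =====
def Claim_equal_resolve_relative_include_py : Prop := ∀ (include_file_name : String) (parent_file_name : String) (parent_file_name_for_error_message : String), Dom_resolve_relative_include_py include_file_name parent_file_name parent_file_name_for_error_message → Pre_resolve_relative_include_py include_file_name parent_file_name parent_file_name_for_error_message → Spec_resolve_relative_include_py include_file_name parent_file_name parent_file_name_for_error_message (resolve_relative_include_py include_file_name parent_file_name parent_file_name_for_error_message)

-- ===== LEMMAS AND PROOFS =====

-- findIdx of the first nonempty component = length of the all-empty prefix
theorem pvFindIdx_eq_takeWhile (l : List String) :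
    l.findIdx (fun part => !(part == "")) = (l.takeWhile (fun part => part == "")).length := by
  induction l with
  | nil => rfl
  | cons s t ih =>
    by_cases hs : (s == "") = true
    · simp [List.findIdx_cons, hs, ih]
    · simp [List.findIdx_cons, hs]

-- the all-empty prefix really is a replicate of ""
theorem pvTakeWhile_replicate (l : List String) :
    l.takeWhile (fun part => part == "") =
      List.replicate (l.takeWhile (fun part => part == "")).length "" := by
  rw [List.eq_replicate_iff]
  exact ⟨rfl, fun b hb => by simpa using List.mem_takeWhile_imp hb⟩

theorem pvDrop_takeWhile (l : List String) :
    l.drop (l.takeWhile (fun part => part == "")).length =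
      l.dropWhile (fun part => part == "") := by
  induction l with
  | nil => rfl
  | cons a as ih =>
    by_cases ha : (a == "") = true
    · simp [ha, ih]
    · simp [ha]

-- a dropWhile result never starts with an element satisfying the predicate
theorem pvDropWhile_head (p : String → Bool) (l : List String) (s : String) (t : List String)
    (h : l.dropWhile p = s :: t) : p s = false := by
  induction l with
  | nil => simp at h
  | cons a as ih =>
    rw [List.dropWhile_cons] at h
    by_cases hp : p a = true
    · rw [if_pos hp] at h
      exact ih h
    · rw [if_neg hp] at h
      injection h with h1 _
      subst h1
      simpa using hp

-- A's while loop on a list of d empty components followed by rest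
theorem pvLoopA_spec (d : Nat) : ∀ (ps rest : List String),
    d ≤ ps.length →
    pvLoopA (List.replicate d "" ++ rest) ps = pvLoopA rest (ps.take (ps.length - d)) := by
  induction d with
  | zero => intro ps rest _; simp
  | succ d ih =>
    intro ps rest hd
    rw [List.replicate_succ, List.cons_append]
    have hps : ps ≠ [] := by
      intro h; rw [h] at hd; simp at hd
    show (if ("" : String) = "" then if ps = [] then none else pvLoopA (List.replicate d "" ++ rest) ps.dropLast else _) = _
    rw [if_pos rfl, if_neg hps, ih ps.dropLast rest (by simp; omega)]
    congr 1
    rw [List.dropLast_eq_take, List.take_take]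
    congr 1
    simp only [List.length_take]
    omega

-- the loop stops immediately when the first component is nonempty
theorem pvLoopA_stop (rest : List String) (ps : List String)
    (h : ∀ s ∈ rest.head?, s ≠ "") : pvLoopA rest ps = some (rest, ps) := by
  cases rest with
  | nil => rfl
  | cons s t =>
    have hs : s ≠ "" := h s (by simp)
    simp [pvLoopA, hs]

-- ===== VERDICT (by name: the statement is the Claim_ definition above) =====
theorem resolve_relative_include_py_spec : Claim_equal_resolve_relative_include_py := by
  intro inc par err _ hpre
  unfold Spec_resolve_relative_include_py
  unfold resolve_relative_include_py resolve_relative_include_py_alt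
  obtain ⟨hne, hdot⟩ := hpre
  rw [if_neg hne, if_neg hne]
  by_cases hsw : PySem.Str.startswith inc "." = true
  · obtain ⟨h1, h2⟩ := hdot hsw
    simp only [hsw, Bool.not_true, Bool.false_eq_true, if_false]
    set parts := (PySem.Str.split? inc ".").getD [] with hparts
    set ps := (PySem.Str.split? par ".").getD [] with hps
    set e := parts.findIdx (fun part => !(part == "")) with he
    have heTW : e = (parts.takeWhile (fun part => part == "")).length :=
      pvFindIdx_eq_takeWhile parts
    have hdropW : parts.drop e = parts.dropWhile (fun part => part == "") := by
      rw [heTW]; exact pvDrop_takeWhile parts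
    have hdecomp : parts = List.replicate e "" ++ parts.drop e := by
      conv_lhs => rw [← List.takeWhile_append_dropWhile (p := fun part => part == "") (l := parts)]
      rw [hdropW]
      congr 1
      rw [heTW]
      exact pvTakeWhile_replicate parts
    have hstop : pvLoopA (parts.drop e) (ps.take (ps.length - e)) =
        some (parts.drop e, ps.take (ps.length - e)) := by
      apply pvLoopA_stop
      intro s hs hsemp
      rcases hd : parts.drop e with _ | ⟨x, t⟩
      · rw [hd] at hs; simp at hs
      · rw [hd] at hs
        simp only [List.head?_cons, Option.mem_def, Option.some.injEq] at hs
        have := pvDropWhile_head (fun part => part == "") parts x t (by rw [← hdropW, hd])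
        rw [hs, hsemp] at this
        simp at this
    have hloop : pvLoopA parts ps = some (parts.drop e, ps.take (ps.length - e)) := by
      conv_lhs => rw [hdecomp]
      rw [pvLoopA_spec e ps (parts.drop e) h1, hstop]
    rw [hloop]
    dsimp only
    rw [if_neg h2, if_neg (by omega)]
  · rw [Bool.not_eq_true] at hsw
    rw [hsw]
    simp
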